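-- pv_equiv track=rewrite | github.com/gtokusum/CSCI-C200-Fall-2020 | Assignment6/a6.py | div_9
-- ===== SOURCE A (Python) =====
-- def div_9(x):
--     """
--     Implement the logic in problem 4. You cannot simply divide by nine and return true.
--
--     You are only allowed to use modulo (%) and evenly divides (//) only with the number 10.
--     i.e. 5 % 10
--     """
--     y = [int(d) for d in str(x)]
--     count = 0
--     if x == 0:
--         return True
--     else:
--         while len(y) > 1:
--             count = 0
--             for i in y:
--                 count += i
--             y = [int(d) for d in str(count)]
--         return count == 9
-- ===== SOURCE B (Python) =====
-- def div_9(x):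
--     # Closed form: a number is divisible by 9 iff its digital root is 9 (or it is 0),
--     # which is exactly x % 9 == 0.
--     return x % 9 == 0
-- ===== Notes on version B (the rewrite author's own statement) =====
-- stated objective: simpler
-- what changed: Replaces the repeated string-based digit-sum loop by the closed-form modular test x % 9 == 0, which is what the digital root computes.
-- intended difference: On x = 9 A returns False (its count accumulator is never updated because a single-digit input skips the loop) while B returns True, the intended answer since nine is divisible by nine. — e.g. on div_9(9): A returns false, B returns true
import Mathlib
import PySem

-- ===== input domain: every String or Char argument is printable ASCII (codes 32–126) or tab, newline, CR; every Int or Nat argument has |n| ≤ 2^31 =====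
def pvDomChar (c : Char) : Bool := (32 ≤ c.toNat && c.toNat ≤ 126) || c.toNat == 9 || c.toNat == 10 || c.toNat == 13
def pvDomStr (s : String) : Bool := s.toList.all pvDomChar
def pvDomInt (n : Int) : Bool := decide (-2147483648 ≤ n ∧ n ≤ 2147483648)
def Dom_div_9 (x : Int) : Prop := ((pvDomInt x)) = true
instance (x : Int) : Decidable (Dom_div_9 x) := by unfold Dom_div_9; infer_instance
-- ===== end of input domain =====

-- B replaces A's repeated string-based digit-sum loop by the closed-form modular test x % 9 == 0.

-- ===== PORT A =====
-- int(d) for a single digit character; exact on digit chars (x ≥ 0, guaranteed by Pre_)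
def pyDigitVal (c : Char) : Int := (c.toNat : Int) - 48
-- y = [int(d) for d in str(x)]
def digitsOf (n : Int) : List Int := (PySem.Int.toChars n).map pyDigitVal
-- count = 0; for i in y: count += i
def sumLoop (y : List Int) : Int := y.foldl (· + ·) 0
-- while len(y) > 1: count = sum(y); y = digits(count)   (fuel only guards totality; x+1 iterations always suffice)
def whileLoop : Nat → List Int → Int → Int
  | 0, _, count => count
  | f + 1, y, count =>
    if 1 < y.length then whileLoop f (digitsOf (sumLoop y)) (sumLoop y) else count

def div_9 (x : Int) : Bool :=
  let y := digitsOf x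
  if x = 0 then true
  else whileLoop (x.natAbs + 1) y 0 == 9

-- ===== PORT B =====
def div_9_alt (x : Int) : Bool := PySem.Int.mod x 9 == 0

-- ===== PRECONDITION & SPEC =====
-- Pre_ excludes x < 0, where A raises ValueError (int('-') on the sign character of str(x)).
def Pre_div_9 (x : Int) : Prop := 0 ≤ x
instance (x : Int) : Decidable (Pre_div_9 x) := by unfold Pre_div_9; infer_instance
def pvWitness_div_9 : Int := (18)

-- On x = 9 A returns False (its count accumulator is never updated because a single-digit input
-- skips the loop) while B returns True, the intended answer since nine is divisible by nine.
def D_div_9 (x : Int) : Prop := x = 9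
instance (x : Int) : Decidable (D_div_9 x) := by unfold D_div_9; infer_instance
def Spec_div_9 (x : Int) (out : Bool) : Prop := ¬ D_div_9 x → out = div_9_alt x
instance (x : Int) (out : Bool) : Decidable (Spec_div_9 x out) := by unfold Spec_div_9; infer_instance
def pvDiffWitness_div_9 : Int := (9)
def pvDiffWitnessOut_div_9 : Bool × Bool := (false, true)

-- ===== CLAIM (what is proved, stated in full; the proofs are below) =====
def Claim_unchanged_div_9 : Prop := ∀ (x : Int), Dom_div_9 x → Pre_div_9 x → Spec_div_9 x (div_9 x)
def Claim_changed_div_9 : Prop := Dom_div_9 (pvDiffWitness_div_9) ∧ Pre_div_9 (pvDiffWitness_div_9) ∧ D_div_9 (pvDiffWitness_div_9) ∧ div_9 (pvDiffWitness_div_9) = pvDiffWitnessOut_div_9.1 ∧ div_9_alt (pvDiffWitness_div_9) = pvDiffWitnessOut_div_9.2 ∧ pvDiffWitnessOut_div_9.1 ≠ pvDiffWitnessOut_div_9.2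
def Claim_exact_div_9 : Prop := ∀ (x : Int), Dom_div_9 x → Pre_div_9 x → D_div_9 x → div_9 x ≠ div_9_alt x

-- ===== LEMMAS AND PROOFS =====

-- `Nat.toDigits` (what `str` prints for n ≥ 0) in terms of `Nat.digits`
theorem toDigitsCore_eq (f : ℕ) : ∀ (n : ℕ) (ds : List Char), n < f →
    Nat.toDigitsCore 10 f n ds
      = (if n = 0 then ['0'] else ((Nat.digits 10 n).map Nat.digitChar).reverse) ++ ds := by
  induction f with
  | zero => intro n ds h; omega
  | succ f ih =>
    intro n ds h
    by_cases h0 : n = 0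
    · subst h0; simp [Nat.toDigitsCore]; decide
    · have hd : Nat.digits 10 n = n % 10 :: Nat.digits 10 (n / 10) :=
        Nat.digits_def' (by norm_num) (Nat.pos_of_ne_zero h0)
    -- unfold one step of toDigitsCore
      by_cases hq : n / 10 = 0
      · have hnil : Nat.digits 10 (n / 10) = [] := by simp [hq]
        simp [Nat.toDigitsCore, hq, h0, hd]
      · have hlt : n / 10 < f := by
          have h1 : n / 10 < n := Nat.div_lt_self (Nat.pos_of_ne_zero h0) (by norm_num)
          omega
        have := ih (n / 10) ((n % 10).digitChar :: ds) hlt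
        simp [Nat.toDigitsCore, hq, h0, hd, this]

theorem toDigits10_eq (n : ℕ) :
    Nat.toDigits 10 n = (if n = 0 then ['0'] else ((Nat.digits 10 n).map Nat.digitChar).reverse) := by
  have := toDigitsCore_eq (n + 1) n [] (by omega)
  simpa [Nat.toDigits] using this

theorem digitVal_digitChar (d : ℕ) (h : d < 10) : pyDigitVal (Nat.digitChar d) = (d : Int) := by
  interval_cases d <;> decide

theorem digitsOf_natCast (n : ℕ) :
    digitsOf (n : Int)
      = if n = 0 then [(0 : Int)] else ((Nat.digits 10 n).map (Nat.cast : ℕ → ℤ)).reverse := by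
  have hnn : ¬ ((n : Int) < 0) := by omega
  unfold digitsOf PySem.Int.toChars
  rw [if_neg hnn]
  have htn : (n : Int).toNat = n := Int.toNat_natCast n
  rw [htn, toDigits10_eq]
  by_cases h0 : n = 0
  · subst h0; decide
  · rw [if_neg h0, if_neg h0, List.map_reverse, List.map_map]
    congr 1
    apply List.map_congr_left
    intro d hd
    exact digitVal_digitChar d (Nat.digits_lt_base (by norm_num) hd)

theorem sumLoop_eq_sum (y : List Int) : sumLoop y = y.sum := by
  simp [sumLoop, List.sum_eq_foldl]

theorem sum_digitsOf (n : ℕ) : sumLoop (digitsOf (n : Int)) = ((Nat.digits 10 n).sum : Int) := by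
  rw [sumLoop_eq_sum, digitsOf_natCast]
  by_cases h0 : n = 0
  · subst h0; simp
  · rw [if_neg h0, List.sum_reverse]
    exact (Nat.cast_list_sum (Nat.digits 10 n)).symm

-- digit-sum facts
theorem digitSum_le (n : ℕ) : (Nat.digits 10 n).sum ≤ n := Nat.digit_sum_le 10 n

theorem digitSum_pos (n : ℕ) (h : 0 < n) : 0 < (Nat.digits 10 n).sum := by
  rcases Nat.eq_zero_or_pos (Nat.digits 10 n).sum with hz | hp
  · exfalso
    exact Nat.getLast_digit_ne_zero 10 (m := n) (by omega)
      (List.sum_eq_zero_iff.mp hz _ (List.getLast_mem _))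
  · exact hp

theorem digitSum_lt (n : ℕ) (h : 10 ≤ n) : (Nat.digits 10 n).sum < n := by
  have hd : Nat.digits 10 n = n % 10 :: Nat.digits 10 (n / 10) :=
    Nat.digits_def' (by norm_num) (by omega)
  have h2 : (Nat.digits 10 (n / 10)).sum ≤ n / 10 := digitSum_le (n / 10)
  rw [hd]
  simp only [List.sum_cons]
  omega

theorem digitSum_mod9 (n : ℕ) : (Nat.digits 10 n).sum % 9 = n % 9 :=
  (Nat.modEq_digits_sum 9 10 (by norm_num) n).symm

-- length of the digit list
theorem len_digitsOf_small (n : ℕ) (h : n < 10) : (digitsOf (n : Int)).length = 1 := by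
  rw [digitsOf_natCast]
  by_cases h0 : n = 0
  · simp [h0]
  · have hd : Nat.digits 10 n = n % 10 :: Nat.digits 10 (n / 10) :=
      Nat.digits_def' (by norm_num) (Nat.pos_of_ne_zero h0)
    have hq : n / 10 = 0 := Nat.div_eq_of_lt h
    simp [h0, hd, hq]

theorem len_digitsOf_big (n : ℕ) (h : 10 ≤ n) : 1 < (digitsOf (n : Int)).length := by
  rw [digitsOf_natCast, if_neg (by omega)]
  have hd : Nat.digits 10 n = n % 10 :: Nat.digits 10 (n / 10) :=
    Nat.digits_def' (by norm_num) (by omega)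
  have hq : Nat.digits 10 (n / 10) ≠ [] := by
    simp [Nat.digits_eq_nil_iff_eq_zero]; omega
  rw [hd]
  simp only [List.length_reverse, List.length_map, List.length_cons]
  have := List.length_pos_iff.mpr hq
  omega

theorem whileLoop_small (f : ℕ) (m : ℕ) (c : Int) (h : m < 10) :
    whileLoop f (digitsOf (m : Int)) c = c := by
  cases f with
  | zero => rfl
  | succ f =>
    have := len_digitsOf_small m h
    simp [whileLoop, this]

theorem whileLoop_root (f : ℕ) : ∀ (n : ℕ) (c : Int), n < f → 10 ≤ n →
    ∃ r : ℕ, whileLoop f (digitsOf (n : Int)) c = (r : Int) ∧ 1 ≤ r ∧ r ≤ 9 ∧ r % 9 = n % 9 := by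
  induction f with
  | zero => intro n c h; omega
  | succ f ih =>
    intro n c hf hn
    have hlen := len_digitsOf_big n hn
    have hsum := sum_digitsOf n
    set s := (Nat.digits 10 n).sum with hs
    have hmod := digitSum_mod9 n
    have hpos : 0 < s := digitSum_pos n (by omega)
    have hlt : s < n := digitSum_lt n hn
    rw [whileLoop, if_pos hlen, hsum]
    by_cases hsmall : s < 10
    · refine ⟨s, whileLoop_small f s (s : Int) hsmall, by omega, by omega, hmod⟩
    · obtain ⟨r, hr, h1, h9, hm⟩ := ih s (s : Int) (by omega) (by omega)
      exact ⟨r, hr, h1, h9, by omega⟩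

-- B's test as divisibility
theorem alt_iff (x : Int) : div_9_alt x = decide ((9 : Int) ∣ x) := by
  unfold div_9_alt
  have hiff := PySem.Int.mod_eq_zero_iff_dvd x 9
  by_cases h : (9 : Int) ∣ x
  · simp [h]
  · have hne : PySem.Int.mod x 9 ≠ 0 := fun hc => h (hiff.mp hc)
    simp [h, hne]

theorem div_9_spec : Claim_unchanged_div_9 := by
  intro x _ hpre hnd
  unfold D_div_9 at hnd
  have hx : x = ((x.toNat : ℕ) : Int) := by
    unfold Pre_div_9 at hpre; omega
  set n := x.toNat with hn
  by_cases h0 : x = 0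
  · subst h0; decide
  · rw [alt_iff]
    by_cases hsmall : n < 10
    · -- single digit, 1..8 (9 is excluded by D_)
      unfold div_9
      rw [if_neg h0, hx, Int.natAbs_natCast, whileLoop_small (n + 1) n 0 hsmall]
      have hdvd : ¬ ((9 : Int) ∣ (n : Int)) := by omega
      simp [hdvd]
    · -- n ≥ 10: the loop computes the digital root r, 1 ≤ r ≤ 9, r ≡ n [MOD 9]
      obtain ⟨r, hr, h1, h9, hm⟩ := whileLoop_root (n + 1) n 0 (by omega) (by omega)
      unfold div_9
      rw [if_neg h0, hx, Int.natAbs_natCast, hr]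
      by_cases h9x : (9 : Int) ∣ (n : Int)
      · have : (r : Int) = 9 := by omega
        simp [this, h9x]
      · have : (r : Int) ≠ 9 := by omega
        simp [this, h9x]

-- ===== VERDICT (by name: the statement is the Claim_ definition above) =====
theorem div_9_changed : Claim_changed_div_9 := by unfold Claim_changed_div_9; decide

theorem div_9_tight : Claim_exact_div_9 := by
  intro x _ _ hd
  unfold D_div_9 at hd
  subst hd; decide
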